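-- pv_equiv track=rewrite | github.com/blackju1982/python | graph_io/main.py | inputGraph
-- ===== SOURCE A (Python) =====
-- def inputGraph(para):
--     lines = para.split("\n")
--     vertexPoints = []
--     connections = []
--     input_edges = False
--     for line in lines:
--         if line.strip() == "#end":
--             input_edges = True
--         elif input_edges == True:
--             edge = line.split(",")
--             connections.append((edge[0].strip(),edge[1].strip()))
--         else:
--             vertexPoints.append(line.strip())
--     return (vertexPoints, connections)
-- ===== SOURCE B (Python) =====
-- def inputGraph(para):
--     lines = para.split("\n")
--     idx = next((i for i, l in enumerate(lines) if l.strip() == "#end"), None)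
--     if idx is None:
--         return ([l.strip() for l in lines], [])
--     vertexPoints = [l.strip() for l in lines[:idx]]
--     connections = []
--     for l in lines[idx + 1:]:
--         if l.strip() == "#end":
--             continue
--         parts = l.split(",")
--         connections.append((parts[0].strip(), parts[1].strip()))
--     return (vertexPoints, connections)
-- ===== Notes on version B (the rewrite author's own statement) =====
-- stated objective: alternative
-- what changed: Replaces A's flag-driven single pass with a locate-then-partition structure: find the first '#end' line's index, map strip over the prefix for vertices, and build edges from the suffix (skipping '#end' lines) in a second pass.
import Mathlib
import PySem

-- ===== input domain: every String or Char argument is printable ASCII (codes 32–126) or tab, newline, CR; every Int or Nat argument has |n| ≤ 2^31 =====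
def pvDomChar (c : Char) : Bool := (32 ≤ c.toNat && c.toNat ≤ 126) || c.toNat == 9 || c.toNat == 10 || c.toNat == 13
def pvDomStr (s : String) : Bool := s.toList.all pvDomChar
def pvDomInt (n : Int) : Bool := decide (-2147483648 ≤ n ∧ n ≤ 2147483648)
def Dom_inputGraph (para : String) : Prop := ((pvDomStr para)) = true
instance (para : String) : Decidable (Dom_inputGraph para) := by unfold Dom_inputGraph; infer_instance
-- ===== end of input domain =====

-- B replaces A's flag-driven single pass with locate-the-'#end'-boundary-then-partition (two passes); return values proved equal on Pre_.

-- ===== PORT A =====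
-- s.split(sep) with the nonempty separators "\n" / "," : split? is always `some`, .getD [] never fires
def pvSplit (s sep : String) : List String := (PySem.Str.split? s sep).getD []

-- the (edge[0].strip(), edge[1].strip()) step; edge[1] missing (no ',') is an IndexError, excluded by Pre_
def pvEdgeOf (line : String) : String × String :=
  let edge := pvSplit line ","
  (PySem.Str.strip ((PySem.List.pyGet? edge 0).getD ""),
   PySem.Str.strip ((PySem.List.pyGet? edge 1).getD ""))

def inputGraph (para : String) : List String × (List (String × String)) :=
  let lines := pvSplit para "\n"
  let st := lines.foldl
    (fun (st : List String × List (String × String) × Bool) line =>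
      if PySem.Str.strip line = "#end" then (st.1, st.2.1, true)
      else if st.2.2 = true then (st.1, st.2.1 ++ [pvEdgeOf line], st.2.2)
      else (st.1 ++ [PySem.Str.strip line], st.2.1, st.2.2))
    ([], [], false)
  (st.1, st.2.1)

-- ===== PORT B =====
def inputGraph_alt (para : String) : List String × (List (String × String)) :=
  let lines := pvSplit para "\n"
  match lines.findIdx? (fun l => PySem.Str.strip l = "#end") with
  | none => (lines.map PySem.Str.strip, [])
  | some idx =>
    ((lines.take idx).map PySem.Str.strip,
     ((lines.drop (idx + 1)).filter (fun l => ¬ (PySem.Str.strip l = "#end"))).map pvEdgeOf)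

-- ===== PRECONDITION & SPEC =====
-- Pre_ excludes exactly the inputs on which A raises IndexError: a comma-free line (not stripping
-- to '#end') occurring after the first '#end' line.
def Pre_inputGraph (para : String) : Prop :=
  ∀ l ∈ ((pvSplit para "\n").dropWhile
            (fun l => ¬ (PySem.Str.strip l = "#end"))).drop 1,
    PySem.Str.strip l = "#end" ∨ 2 ≤ (pvSplit l ",").length

instance (para : String) : Decidable (Pre_inputGraph para) := by
  unfold Pre_inputGraph; infer_instance

def pvWitness_inputGraph : String := "a\nb\n#end\n1,2\n#end\n3, 4"

def Spec_inputGraph (para : String) (out : List String × (List (String × String))) : Prop :=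
  out = inputGraph_alt para

instance (para : String) (out : List String × (List (String × String))) :
    Decidable (Spec_inputGraph para out) := by unfold Spec_inputGraph; infer_instance

-- ===== CLAIM =====
def Claim_equal_inputGraph : Prop :=
  ∀ (para : String), Dom_inputGraph para → Pre_inputGraph para →
    Spec_inputGraph para (inputGraph para)

-- ===== LEMMAS AND PROOFS =====

def pvStep (st : List String × List (String × String) × Bool) (line : String) :
    List String × List (String × String) × Bool :=
  if PySem.Str.strip line = "#end" then (st.1, st.2.1, true)
  else if st.2.2 = true then (st.1, st.2.1 ++ [pvEdgeOf line], st.2.2)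
  else (st.1 ++ [PySem.Str.strip line], st.2.1, st.2.2)

theorem pvFold_true (lines : List String) (vp : List String) (cn : List (String × String)) :
    lines.foldl pvStep (vp, cn, true) =
      (vp, cn ++ (lines.filter (fun l => ¬ (PySem.Str.strip l = "#end"))).map pvEdgeOf, true) := by
  induction lines generalizing cn with
  | nil => simp
  | cons l ls ih =>
    by_cases h : PySem.Str.strip l = "#end" <;>
      simp [pvStep, h, ih]

theorem pvFold_false (lines : List String) (vp : List String) (cn : List (String × String)) :
    lines.foldl pvStep (vp, cn, false) =
      match lines.findIdx? (fun l => PySem.Str.strip l = "#end") with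
      | none => (vp ++ lines.map PySem.Str.strip, cn, false)
      | some idx =>
        (vp ++ (lines.take idx).map PySem.Str.strip,
         cn ++ ((lines.drop (idx + 1)).filter
                  (fun l => ¬ (PySem.Str.strip l = "#end"))).map pvEdgeOf, true) := by
  induction lines generalizing vp with
  | nil => simp
  | cons l ls ih =>
    by_cases h : PySem.Str.strip l = "#end"
    · simp [pvStep, h, List.findIdx?_cons, pvFold_true]
    · simp only [List.foldl_cons, pvStep, h, if_false, Bool.false_eq_true]
      rw [ih (vp ++ [PySem.Str.strip l])]
      simp only [List.findIdx?_cons, h, decide_false, Bool.false_eq_true]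
      cases ls.findIdx? (fun l => decide (PySem.Str.strip l = "#end")) <;>
        simp [List.take_succ_cons, List.drop_succ_cons]

-- ===== VERDICT =====
theorem inputGraph_spec : Claim_equal_inputGraph := by
  intro para _ _
  unfold Spec_inputGraph inputGraph inputGraph_alt
  show (let lines := pvSplit para "\n";
        let st := lines.foldl pvStep ([], [], false); (st.1, st.2.1)) = _
  simp only [pvFold_false]
  cases (pvSplit para "\n").findIdx? (fun l => PySem.Str.strip l = "#end") <;> simp
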